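-- pv_equiv track=rewrite | github.com/VLD62/PythonFundamentals | 00.EXAMS/Exam Preparation l/Problem 2 – Array Manipulator.py | min_element_index
-- ===== SOURCE A (Python) =====
-- def min_element_index(array):
--     even_odd_index = {'even': 0, 'odd': 0}
--     try:
--         min_element_even = min([el for el in array if el % 2 == 0])
--         even_odd_index['even'] = max(
--             [idx for idx, el in enumerate(array) if el == min_element_even])
--     except:
--         even_odd_index['even'] = 'q'
--     try:
--         min_element_odd = min([el for el in array if el % 2 == 1])
--         even_odd_index['odd'] = max(
--             [idx for idx, el in enumerate(array) if el == min_element_odd])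
--     except:
--         even_odd_index['odd'] = 'q'
--     return even_odd_index
-- ===== SOURCE B (Python) =====
-- def min_element_index(array):
--     min_even = None
--     even_idx = 0
--     min_odd = None
--     odd_idx = 0
--     for i, el in enumerate(array):
--         if el % 2 == 0:
--             if min_even is None or el < min_even:
--                 min_even = el
--                 even_idx = i
--             elif el == min_even:
--                 even_idx = i
--         else:
--             if min_odd is None or el < min_odd:
--                 min_odd = el
--                 odd_idx = i
--             elif el == min_odd:
--                 odd_idx = i
--     return {'even': even_idx if min_even is not None else 'q',
--             'odd': odd_idx if min_odd is not None else 'q'}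
-- ===== Notes on version B (the rewrite author's own statement) =====
-- stated objective: alternative
-- what changed: A runs four full passes (min of evens, max-index scan, min of odds, max-index scan) building intermediate lists; B is one pass over enumerate(array) maintaining the running minimum and its last index for each parity.
-- outside the precondition, e.g. on min_element_index([2]): A returns {'even': 0, 'odd': 'q'}, B returns {'even': 0, 'odd': 'q'}; on min_element_index([]): A returns {'even': 'q', 'odd': 'q'}, B returns {'even': 'q', 'odd': 'q'}
import Mathlib
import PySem

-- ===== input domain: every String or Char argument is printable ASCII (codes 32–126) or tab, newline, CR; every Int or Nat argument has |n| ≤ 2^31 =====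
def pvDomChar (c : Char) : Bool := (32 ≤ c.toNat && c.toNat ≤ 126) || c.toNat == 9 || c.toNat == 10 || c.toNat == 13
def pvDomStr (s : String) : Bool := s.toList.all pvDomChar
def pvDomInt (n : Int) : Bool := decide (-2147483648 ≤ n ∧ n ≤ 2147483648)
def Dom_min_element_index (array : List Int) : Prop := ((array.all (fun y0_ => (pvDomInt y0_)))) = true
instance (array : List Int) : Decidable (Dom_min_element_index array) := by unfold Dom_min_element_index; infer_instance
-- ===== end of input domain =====

-- B replaces A's four passes (min of evens, max-index scan, min of odds, max-index scan) by a
-- single pass keeping the running minimum and its last index per parity.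

-- ===== PORT A =====
def min_element_index (array : List Int) : List (String × Int) :=
  let d0 : PySem.Dict String Int := PySem.Dict.ofList [("even", 0), ("odd", 0)]
  let d1 : PySem.Dict String Int :=
    match PySem.List.min? (array.filter (fun el => PySem.Int.mod el 2 = 0)) (fun x => x) with
    | none => PySem.Dict.insert d0 "even" 0   -- Python stores the STRING 'q' here (outside List (String × Int)): excluded by Pre_
    | some m =>
      match PySem.List.max?
          (((PySem.List.enumerate array).filter (fun p => p.2 = m)).map (fun p => p.1)) (fun x => x) with
      | none => PySem.Dict.insert d0 "even" 0   -- max([]) raises; unreachable when the min above exists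
      | some i => PySem.Dict.insert d0 "even" i
  match PySem.List.min? (array.filter (fun el => PySem.Int.mod el 2 = 1)) (fun x => x) with
  | none => (PySem.Dict.insert d1 "odd" 0).items     -- Python stores the STRING 'q' here: excluded by Pre_
  | some m =>
    match PySem.List.max?
        (((PySem.List.enumerate array).filter (fun p => p.2 = m)).map (fun p => p.1)) (fun x => x) with
    | none => (PySem.Dict.insert d1 "odd" 0).items   -- max([]) raises; unreachable when the min above exists
    | some i => (PySem.Dict.insert d1 "odd" i).items

-- ===== PORT B =====
-- one-parity update: running minimum value (none = unset) and last index where it occurred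
def meiUpd (s : Option Int × Int) (i el : Int) : Option Int × Int :=
  match s.1 with
  | none => (some el, i)
  | some v => if el < v then (some el, i) else if el = v then (some v, i) else s

def meiStep (s : (Option Int × Int) × (Option Int × Int)) (p : Int × Int) :
    (Option Int × Int) × (Option Int × Int) :=
  if PySem.Int.mod p.2 2 = 0 then (meiUpd s.1 p.1 p.2, s.2) else (s.1, meiUpd s.2 p.1 p.2)

def min_element_index_alt (array : List Int) : List (String × Int) :=
  let s := (PySem.List.enumerate array).foldl meiStep ((none, 0), (none, 0))
  [("even", match s.1.1 with | some _ => s.1.2 | none => 0),   -- Python returns 'q' when unset: outside Pre_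
   ("odd",  match s.2.1 with | some _ => s.2.2 | none => 0)]

-- ===== PRECONDITION & SPEC =====
-- Pre_ excludes arrays lacking an even or lacking an odd element: there A stores the string 'q'
-- in the dict, which is not a value of the declared Int value type.
def Pre_min_element_index (array : List Int) : Prop :=
  (∃ x ∈ array, PySem.Int.mod x 2 = 0) ∧ (∃ x ∈ array, PySem.Int.mod x 2 = 1)
instance (array : List Int) : Decidable (Pre_min_element_index array) := by
  unfold Pre_min_element_index; infer_instance
def pvWitness_min_element_index : List Int := [3, 1, 2, 1, 4, 2]

def Spec_min_element_index (array : List Int) (out : List (String × Int)) : Prop := out = min_element_index_alt array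
instance (array : List Int) (out : List (String × Int)) : Decidable (Spec_min_element_index array out) := by unfold Spec_min_element_index; infer_instance

-- ===== CLAIM (what is proved, stated in full; the proofs are below) =====
def Claim_equal_min_element_index : Prop := ∀ (array : List Int), Dom_min_element_index array → Pre_min_element_index array → Spec_min_element_index array (min_element_index array)

-- ===== LEMMAS AND PROOFS =====

-- the combined fold splits into two independent one-parity folds over the filtered pair lists
theorem meiStep_split (ps : List (Int × Int)) (s : (Option Int × Int) × (Option Int × Int)) :
    ps.foldl meiStep s =
      ((ps.filter (fun p => PySem.Int.mod p.2 2 = 0)).foldl (fun t p => meiUpd t p.1 p.2) s.1,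
       (ps.filter (fun p => ¬ PySem.Int.mod p.2 2 = 0)).foldl (fun t p => meiUpd t p.1 p.2) s.2) := by
  induction ps generalizing s with
  | nil => rfl
  | cons q t ih =>
    simp only [List.foldl_cons, List.filter_cons]
    by_cases h : PySem.Int.mod q.2 2 = 0
    · simp only [meiStep, if_pos h, h, decide_true, not_true_eq_false, decide_false,
        Bool.false_eq_true, if_false, if_true]
      rw [ih]
      simp only [List.foldl_cons]
    · simp only [meiStep, if_neg h, h, decide_false, not_false_eq_true, decide_true,
        Bool.false_eq_true, if_false, if_true]
      rw [ih]
      simp only [List.foldl_cons]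

theorem min?_id_append_singleton (ys : List Int) (x : Int) :
    PySem.List.min? (ys ++ [x]) (fun y => y) =
      some (match PySem.List.min? ys (fun y => y) with
            | none => x
            | some m => min m x) := by
  cases ys with
  | nil => simp [PySem.List.min?]
  | cons c t =>
    rw [List.cons_append, PySem.List.min?_id_cons, PySem.List.min?_id_cons]
    simp [List.foldl_append]

theorem max?_id_append_singleton (ys : List Int) (x : Int) :
    PySem.List.max? (ys ++ [x]) (fun y => y) =
      some (match PySem.List.max? ys (fun y => y) with
            | none => x
            | some m => max m x) := by
  cases ys with
  | nil => simp [PySem.List.max?]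
  | cons c t =>
    rw [List.cons_append, PySem.List.max?_id_cons, PySem.List.max?_id_cons]
    simp [List.foldl_append]

-- core invariant: on a pair list with strictly increasing indices, the one-parity fold computes
-- the minimum of the values together with the greatest index at which it occurs
theorem meiFold_char (ps : List (Int × Int)) (hinc : ps.Pairwise (fun a b => a.1 < b.1)) :
    ps.foldl (fun t p => meiUpd t p.1 p.2) (none, 0) =
      match PySem.List.min? (ps.map (fun p => p.2)) (fun y => y) with
      | none => (none, 0)
      | some m =>
        (some m,
          (PySem.List.max? ((ps.filter (fun p => p.2 = m)).map (fun p => p.1)) (fun y => y)).getD 0) := by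
  induction ps using List.reverseRecOn with
  | nil => rfl
  | append_singleton t q ih =>
    have hlt : ∀ a ∈ t, a.1 < q.1 := by
      intro a ha
      exact (List.pairwise_append.1 hinc).2.2 a ha q (List.mem_singleton_self q)
    have ih' := ih ((List.pairwise_append.1 hinc).1)
    rw [List.foldl_append, ih']
    rw [List.map_append]
    simp only [List.map_cons, List.map_nil]
    rw [min?_id_append_singleton]
    cases hmin : PySem.List.min? (t.map (fun p => p.2)) (fun y => y) with
    | none =>
      have ht : t = [] := by
        have := PySem.List.min?_eq_none_iff (xs := t.map (fun p => p.2)) (key := fun y => y)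
        simpa using this.1 hmin
      subst ht
      simp [meiUpd, PySem.List.max?_id_cons]
    | some m =>
      have hmem : m ∈ t.map (fun p => p.2) := PySem.List.min?_mem hmin
      have hmin' : ∀ y ∈ t.map (fun p => p.2), m ≤ y := by
        intro y hy; exact PySem.List.min?_isMin hmin y hy
      -- the index list for m over t is nonempty, and all its entries are < q.1
      simp only [List.foldl_cons, List.foldl_nil]
      by_cases hlt2 : q.2 < m
      · -- new strict minimum: no old value equals q.2, index list is [q.1]
        have hne : t.filter (fun p => p.2 = q.2) = [] := by
          rw [List.filter_eq_nil_iff]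
          intro p hp hpe
          have : m ≤ p.2 := hmin' p.2 (List.mem_map_of_mem hp)
          simp at hpe
          omega
        have hm : min m q.2 = q.2 := by omega
        simp only [meiUpd, hm, List.filter_append, hne, List.filter_cons, List.filter_nil]
        have : ¬ (m = q.2) := by omega
        simp_all [meiUpd, PySem.List.max?_id_cons]
      · by_cases heq : q.2 = m
        · -- ties the minimum: index list gains q.1 at the end, which is the new max
          have hm : min m q.2 = m := by omega
          have hfe : t.filter (fun p => p.2 = m) ≠ [] := by
            rcases List.mem_map.1 hmem with ⟨p, hp, hpe⟩
            intro hnil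
            have : p ∈ t.filter (fun p => p.2 = m) := by
              rw [List.mem_filter]; exact ⟨hp, by simp [hpe]⟩
            simp [hnil] at this
          rcases List.exists_cons_of_ne_nil (by
              intro h; exact hfe (by simpa using (List.map_eq_nil_iff.1 h))
            : (t.filter (fun p => p.2 = m)).map (fun p => p.1) ≠ []) with ⟨c, l, hcl⟩
          have hmax : ∀ j ∈ (t.filter (fun p => p.2 = m)).map (fun p => p.1), j < q.1 := by
            intro j hj
            rcases List.mem_map.1 hj with ⟨p, hp, hpe⟩
            exact hpe ▸ hlt p (List.mem_of_mem_filter hp)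
          cases hold : PySem.List.max? ((t.filter (fun p => p.2 = m)).map (fun p => p.1)) (fun y => y) with
          | none =>
            exact absurd ((PySem.List.max?_eq_none_iff _ _).1 hold) (by simp [hcl])
          | some j =>
            have hj : j < q.1 := hmax j (PySem.List.max?_mem hold)
            have hif : ¬ (q.2 < m) := hlt2
            simp only [meiUpd, hif, heq, if_true, if_false, ite_true, ite_false, if_neg hif,
              if_pos rfl, List.filter_append, List.filter_cons, List.filter_nil, decide_true,
              List.map_append, List.map_cons, List.map_nil, max?_id_append_singleton, hold]
            have hmx : max j q.1 = q.1 := by omega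
            simp only [lt_self_iff_false, if_false, min_self, decide_true, ite_true,
              List.map_cons, List.map_nil]
            rw [max?_id_append_singleton, hold]
            simp [hmx]
        · -- larger than the minimum: nothing changes
          have hge : m < q.2 := by
            rcases lt_trichotomy q.2 m with h | h | h
            · exact absurd h hlt2
            · exact absurd h heq
            · exact h
          have hm : min m q.2 = m := by omega
          have h1 : ¬ (q.2 < m) := by omega
          simp only [meiUpd, hm, if_neg h1, if_neg heq, List.filter_append, List.filter_cons,
            List.filter_nil, hge.ne', decide_false, Bool.false_eq_true, if_false, List.append_nil]

-- A's index scan over the whole list equals the scan over the parity-filtered list, because a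
-- value equal to the min of one parity class has that parity
theorem filter_eq_of_parity (cp : Int × Int → Bool) (l : List (Int × Int)) (m : Int)
    (hp : ∀ p : Int × Int, p.2 = m → cp p = true) :
    (l.filter cp).filter (fun p => p.2 = m) = l.filter (fun p => p.2 = m) := by
  induction l with
  | nil => rfl
  | cons q t ih =>
    by_cases h : q.2 = m
    · simp [List.filter_cons, h, hp q h, ih]
    · by_cases h2 : cp q <;> simp [List.filter_cons, h, h2, ih]

theorem parity_dichotomy (x : Int) : PySem.Int.mod x 2 = 0 ∨ PySem.Int.mod x 2 = 1 := by
  have := PySem.Int.mod_two_eq x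
  omega

-- ===== VERDICT (by name: the statement is the Claim_ definition above) =====
theorem min_element_index_spec : Claim_equal_min_element_index := by
  intro array _ hpre
  unfold Spec_min_element_index min_element_index min_element_index_alt
  rw [meiStep_split]
  have hinc := PySem.List.pairwise_lt_enumerate (xs := array) (s := 0)
  have hsnd : ∀ (c : Int → Bool),
      (((PySem.List.enumerate array).filter (fun p => c p.2)).map (fun p => p.2)) =
        array.filter c := by
    intro c
    conv_rhs => rw [← PySem.List.map_snd_enumerate (xs := array) (s := 0), List.filter_map]
    rfl
  have hE := meiFold_char ((PySem.List.enumerate array).filter (fun p => PySem.Int.mod p.2 2 = 0))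
    (List.Pairwise.sublist List.filter_sublist hinc)
  have hO := meiFold_char ((PySem.List.enumerate array).filter (fun p => ¬ PySem.Int.mod p.2 2 = 0))
    (List.Pairwise.sublist List.filter_sublist hinc)
  rw [hsnd (fun x => decide (PySem.Int.mod x 2 = 0))] at hE
  rw [hsnd (fun x => decide (¬ PySem.Int.mod x 2 = 0))] at hO
  -- the odd filter in A (mod = 1) is the complement of the even one
  have hodd : array.filter (fun el => decide (PySem.Int.mod el 2 = 1)) =
      array.filter (fun x => decide (¬ PySem.Int.mod x 2 = 0)) := by
    apply List.filter_congr
    intro x _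
    rcases parity_dichotomy x with h | h <;> simp [h]
  rcases hpre with ⟨⟨xe, hxe, hxe2⟩, ⟨xo, hxo, hxo2⟩⟩
  have hne : array.filter (fun el => decide (PySem.Int.mod el 2 = 0)) ≠ [] := by
    intro h
    have hmem : xe ∈ array.filter (fun el => decide (PySem.Int.mod el 2 = 0)) :=
      List.mem_filter.2 ⟨hxe, by rw [decide_eq_true_eq]; exact hxe2⟩
    rw [h] at hmem
    simp at hmem
  have hno : array.filter (fun el => decide (PySem.Int.mod el 2 = 1)) ≠ [] := by
    intro h
    have hmem : xo ∈ array.filter (fun el => decide (PySem.Int.mod el 2 = 1)) :=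
      List.mem_filter.2 ⟨hxo, by rw [decide_eq_true_eq]; exact hxo2⟩
    rw [h] at hmem
    simp at hmem
  cases hminE : PySem.List.min? (array.filter (fun el => decide (PySem.Int.mod el 2 = 0))) (fun y => y) with
  | none => exact absurd ((PySem.List.min?_eq_none_iff _ _).1 hminE) hne
  | some mE =>
    cases hminO : PySem.List.min? (array.filter (fun el => decide (PySem.Int.mod el 2 = 1))) (fun y => y) with
    | none => exact absurd ((PySem.List.min?_eq_none_iff _ _).1 hminO) hno
    | some mO =>
      rw [hminE] at hE
      rw [hodd] at hminO
      rw [hminO] at hO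
      dsimp only [] at hE hO
      -- rewrite the filtered index scans back to scans over the whole enumerate
      have hmE : PySem.Int.mod mE 2 = 0 := by
        have := PySem.List.min?_mem hminE
        simpa using (List.mem_filter.1 this).2
      have hmO : ¬ PySem.Int.mod mO 2 = 0 := by
        have := PySem.List.min?_mem hminO
        simpa using (List.mem_filter.1 this).2
      rw [filter_eq_of_parity (fun p => decide (PySem.Int.mod p.2 2 = 0)) _ mE
        (by intro p hp2; rw [decide_eq_true_eq, hp2]; exact hmE)] at hE
      rw [filter_eq_of_parity (fun p => decide (¬ PySem.Int.mod p.2 2 = 0)) _ mO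
        (by intro p hp2; rw [decide_eq_true_eq, hp2]; exact hmO)] at hO
      rw [hE, hO]
      have hde : ∀ x y : Int,
          (((PySem.Dict.ofList [(("even" : String), (0 : Int)), ("odd", 0)]).insert "even" x).insert
              "odd" y).items = [("even", x), ("odd", y)] := fun x y => rfl
      cases hmaxE : PySem.List.max?
          (((PySem.List.enumerate array).filter (fun p => p.2 = mE)).map (fun p => p.1)) (fun y => y) with
      | none =>
        cases hmaxO : PySem.List.max?
            (((PySem.List.enumerate array).filter (fun p => p.2 = mO)).map (fun p => p.1)) (fun y => y) <;>
          simp [hmaxE, hmaxO, hde]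
      | some iE =>
        cases hmaxO : PySem.List.max?
            (((PySem.List.enumerate array).filter (fun p => p.2 = mO)).map (fun p => p.1)) (fun y => y) <;>
          simp [hmaxE, hmaxO, hde]
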